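-- pv_equiv track=rewrite | github.com/AntoChriswin/DAA-assignment-8 | 74.Maximum Sum of Distinct Subarrays With Length K.py | maxSumOfDistinctSubarrays
-- ===== SOURCE A (Python) =====
-- def maxSumOfDistinctSubarrays(nums, k):
--     if len(set(nums)) < k:
--         return 0
--
--     max_sum = 0
--     for i in range(len(nums) - k + 1):
--         if len(set(nums[i:i + k])) == k:
--             max_sum = max(max_sum, sum(nums[i:i + k]))
--
--     return max_sum
-- ===== SOURCE B (Python) =====
-- def maxSumOfDistinctSubarrays(nums, k):
--     # O(n) sliding window: running sum + frequency map + distinct counter.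
--     if k <= 0 or k > len(nums):
--         return 0
--     freq = {}
--     s = 0
--     distinct = 0
--     best = 0
--     for i, x in enumerate(nums):
--         s += x
--         c = freq.get(x, 0)
--         freq[x] = c + 1
--         if c == 0:
--             distinct += 1
--         if i >= k:
--             y = nums[i - k]
--             s -= y
--             cy = freq[y]
--             freq[y] = cy - 1
--             if cy == 1:
--                 distinct -= 1
--         if i >= k - 1 and distinct == k:
--             best = max(best, s)
--     return best
-- ===== Notes on version B (the rewrite author's own statement) =====
-- stated objective: faster
-- what changed: Replaced the per-window set-build and re-summation (O(n*k)) by a single sliding-window pass maintaining a running sum, a frequency map and a distinct-element counter (O(n)).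
import Mathlib
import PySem

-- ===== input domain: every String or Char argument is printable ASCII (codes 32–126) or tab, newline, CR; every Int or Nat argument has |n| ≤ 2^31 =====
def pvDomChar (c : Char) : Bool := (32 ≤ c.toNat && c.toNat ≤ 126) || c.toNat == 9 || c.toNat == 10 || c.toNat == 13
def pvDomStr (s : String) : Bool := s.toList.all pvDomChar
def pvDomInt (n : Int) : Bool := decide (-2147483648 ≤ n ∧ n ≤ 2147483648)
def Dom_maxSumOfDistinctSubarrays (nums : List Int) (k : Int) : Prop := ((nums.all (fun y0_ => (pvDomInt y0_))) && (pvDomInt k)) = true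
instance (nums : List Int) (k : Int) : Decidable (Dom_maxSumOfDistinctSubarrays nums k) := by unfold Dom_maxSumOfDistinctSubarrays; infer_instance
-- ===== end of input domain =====

-- B replaces A's per-window set-build and re-summation by one sliding-window pass
-- (running sum + frequency map + distinct counter); objective: faster.

-- ===== PORT A =====
def maxSumOfDistinctSubarrays (nums : List Int) (k : Int) : Int :=
  if ((PySem.Set.ofList nums).length : Int) < k then 0
  else
    (PySem.List.pyRange 0 ((nums.length : Int) - k + 1) 1).foldl
      (fun max_sum i =>
        if ((PySem.Set.ofList (PySem.List.slice nums (some i) (some (i + k)))).length : Int) = k then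
          max max_sum (PySem.List.slice nums (some i) (some (i + k))).sum
        else max_sum) 0

-- ===== PORT B =====
-- loop body of Source B: state (s, freq, distinct, best), element (i, x)
def pvBStep (nums : List Int) (k : Int) (st : Int × PySem.Dict Int Int × Int × Int)
    (p : Int × Int) : Int × PySem.Dict Int Int × Int × Int :=
  let s := st.1 + p.2
  let c := st.2.1.getD p.2 0
  let freq := st.2.1.insert p.2 (c + 1)
  let distinct := if c = 0 then st.2.2.1 + 1 else st.2.2.1
  let sfd : Int × PySem.Dict Int Int × Int :=
    if k ≤ p.1 then
      let y := PySem.List.pyGetD nums (p.1 - k) 0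
      let cy := freq.getD y 0
      (s - y, freq.insert y (cy - 1), if cy = 1 then distinct - 1 else distinct)
    else (s, freq, distinct)
  let best := if k - 1 ≤ p.1 ∧ sfd.2.2 = k then max st.2.2.2 sfd.1 else st.2.2.2
  (sfd.1, sfd.2.1, sfd.2.2, best)

def maxSumOfDistinctSubarrays_alt (nums : List Int) (k : Int) : Int :=
  if k ≤ 0 ∨ (nums.length : Int) < k then 0
  else
    ((PySem.List.enumerate nums 0).foldl (pvBStep nums k)
      (0, PySem.Dict.empty, 0, 0)).2.2.2

-- ===== PRECONDITION & SPEC =====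
def Spec_maxSumOfDistinctSubarrays (nums : List Int) (k : Int) (out : Int) : Prop := out = maxSumOfDistinctSubarrays_alt nums k
instance (nums : List Int) (k : Int) (out : Int) : Decidable (Spec_maxSumOfDistinctSubarrays nums k out) := by unfold Spec_maxSumOfDistinctSubarrays; infer_instance

-- ===== CLAIM (what is proved, stated in full; the proofs are below) =====
def Claim_equal_maxSumOfDistinctSubarrays : Prop := ∀ (nums : List Int) (k : Int), Dom_maxSumOfDistinctSubarrays nums k → Spec_maxSumOfDistinctSubarrays nums k (maxSumOfDistinctSubarrays nums k)

-- ===== LEMMAS AND PROOFS =====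

def pvWin (nums : List Int) (k' m : Nat) : List Int := (nums.take m).drop (m - k')
def pvSpec (nums : List Int) (k' m : Nat) : Int :=
  (List.range (m + 1 - k')).foldl
    (fun ms i =>
      if ((nums.drop i).take k').toFinset.card = k' then max ms ((nums.drop i).take k').sum
      else ms) 0
lemma pvSetLen (l : List Int) : (PySem.Set.ofList l).length = l.toFinset.card := by
  have h1 : (PySem.Set.ofList l).Nodup := PySem.Set.nodup_ofList l
  have h2 : (PySem.Set.ofList l).toFinset = l.toFinset := by
    ext x; simp [PySem.Set.mem_ofList]
  calc (PySem.Set.ofList l).length = (PySem.Set.ofList l).toFinset.card := (List.toFinset_card_of_nodup h1).symm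
    _ = l.toFinset.card := by rw [h2]

lemma pvEnumAppend (xs : List Int) (x : Int) (s : Int) :
    PySem.List.enumerate (xs ++ [x]) s
      = PySem.List.enumerate xs s ++ [(s + xs.length, x)] := by
  induction xs generalizing s with
  | nil => simp [PySem.List.enumerate_cons, PySem.List.enumerate_nil]
  | cons a t ih => simp [PySem.List.enumerate_cons, ih]; ring_nf

lemma pvCardApp (w : List Int) (x : Int) :
    (w ++ [x]).toFinset.card = w.toFinset.card + (if x ∈ w then 0 else 1) := by
  by_cases hx : x ∈ w
  · simp [List.toFinset_append, hx, Finset.insert_eq_self.2 (List.mem_toFinset.2 hx)]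
  · rw [List.toFinset_append]
    simp only [List.toFinset_cons, List.toFinset_nil, insert_empty_eq]
    rw [Finset.union_comm, Finset.singleton_union,
      Finset.card_insert_of_notMem (by simpa using hx)]
    simp [hx]

lemma pvCardCons (y : Int) (w : List Int) :
    (y :: w).toFinset.card = w.toFinset.card + (if y ∈ w then 0 else 1) := by
  by_cases hy : y ∈ w
  · simp [List.toFinset_cons, hy, Finset.insert_eq_self.2 (List.mem_toFinset.2 hy)]
  · rw [List.toFinset_cons, Finset.card_insert_of_notMem (by simpa using hy)]
    simp [hy]

lemma pvWinLow (nums : List Int) (k' m : Nat) (h : m ≤ k') : pvWin nums k' m = nums.take m := by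
  simp [pvWin, Nat.sub_eq_zero_of_le h]

lemma pvWinEq (nums : List Int) (k' m : Nat) :
    pvWin nums k' m = (nums.drop (m - k')).take (m - (m - k')) := by
  simp [pvWin, List.drop_take]

lemma pvWinSucc_lt (nums : List Int) (k' m : Nat) (hm : m < nums.length) (h : m < k') :
    pvWin nums k' (m+1) = pvWin nums k' m ++ [nums[m]] := by
  rw [pvWinLow nums k' m (by omega), pvWinLow nums k' (m+1) h, List.take_add_one]
  simp [List.getElem?_eq_getElem hm]

lemma pvWinSucc_ge (nums : List Int) (k' m : Nat) (hm : m < nums.length) (h : k' ≤ m)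
    (hk : 1 ≤ k') (hd : m - k' < nums.length) :
    pvWin nums k' m ++ [nums[m]] = nums[m - k'] :: pvWin nums k' (m+1) := by
  have htake : nums.take (m+1) = nums.take m ++ [nums[m]] := by
    rw [List.take_add_one]; simp [List.getElem?_eq_getElem hm]
  have hlen : (nums.take m).length = m := by simp; omega
  have h1 : pvWin nums k' m ++ [nums[m]] = (nums.take (m+1)).drop (m - k') := by
    rw [htake, List.drop_append_of_le_length (by omega)]
    rfl
  rw [h1, List.drop_eq_getElem_cons (by simp; omega)]
  have h2 : (nums.take (m+1))[m - k']'(by simp; omega) = nums[m - k'] := by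
    simp [List.getElem_take]
  rw [h2]
  have h3 : m - k' + 1 = m + 1 - k' := by omega
  rw [h3]; rfl

lemma pvSpecSucc (nums : List Int) (k' m : Nat) (h : k' ≤ m + 1) :
    pvSpec nums k' (m+1)
      = if ((nums.drop (m+1-k')).take k').toFinset.card = k'
        then max (pvSpec nums k' m) ((nums.drop (m+1-k')).take k').sum
        else pvSpec nums k' m := by
  unfold pvSpec
  have h1 : m + 1 + 1 - k' = (m + 1 - k') + 1 := by omega
  rw [h1, List.range_succ, List.foldl_append]
  simp only [List.foldl_cons, List.foldl_nil]

lemma pvBInv (nums : List Int) (k' : Nat) (hk : 1 ≤ k') :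
    ∀ m, m ≤ nums.length →
      (((PySem.List.enumerate (nums.take m) 0).foldl (pvBStep nums (k' : Int))
          (0, PySem.Dict.empty, 0, 0)).1 = (pvWin nums k' m).sum ∧
       (∀ v, ((PySem.List.enumerate (nums.take m) 0).foldl (pvBStep nums (k' : Int))
          (0, PySem.Dict.empty, 0, 0)).2.1.getD v 0 = ((pvWin nums k' m).count v : Int)) ∧
       ((PySem.List.enumerate (nums.take m) 0).foldl (pvBStep nums (k' : Int))
          (0, PySem.Dict.empty, 0, 0)).2.2.1 = ((pvWin nums k' m).toFinset.card : Int) ∧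
       ((PySem.List.enumerate (nums.take m) 0).foldl (pvBStep nums (k' : Int))
          (0, PySem.Dict.empty, 0, 0)).2.2.2 = pvSpec nums k' m) := by
  intro m
  induction m with
  | zero =>
    intro _
    refine ⟨by simp [pvWin, PySem.List.enumerate_nil], ?_, by simp [pvWin, PySem.List.enumerate_nil], ?_⟩
    · intro v
      simp [pvWin, PySem.List.enumerate_nil, pysem]
    · simp [pvSpec, Nat.sub_eq_zero_of_le hk, PySem.List.enumerate_nil]
  | succ m ih =>
    intro hm1
    have hm : m ≤ nums.length := by omega
    obtain ⟨ihs, ihf, ihd, ihb⟩ := ih hm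
    have hx : m < nums.length := by omega
    have htake : nums.take (m+1) = nums.take m ++ [nums[m]] := by
      rw [List.take_add_one]; simp [List.getElem?_eq_getElem hx]
    have hlen : (nums.take m).length = m := by simp; omega
    rw [htake, pvEnumAppend, hlen, List.foldl_append]
    simp only [List.foldl_cons, List.foldl_nil]
    set st := (PySem.List.enumerate (nums.take m) 0).foldl (pvBStep nums (k':Int))
      (0, PySem.Dict.empty, 0, 0) with hst
    set x := nums[m] with hxdef
    set w := pvWin nums k' m with hw
    set w1 := pvWin nums k' (m+1) with hw1
    simp only [pvBStep, zero_add]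
    have hcnt : ∀ v, (st.2.1.insert x (st.2.1.getD x 0 + 1)).getD v 0 = ((w ++ [x]).count v : Int) := by
      intro v
      by_cases hv : v = x
      · subst hv
        rw [PySem.Dict.getD_insert_self, ihf _, List.count_append]
        simp
      · rw [PySem.Dict.getD_insert_of_ne _ _ _ hv, ihf v, List.count_append,
          List.count_eq_zero.2 (by simp [hv] : v ∉ [x])]
        simp
    have hdapp : (if st.2.1.getD x 0 = 0 then st.2.2.1 + 1 else st.2.2.1)
        = (((w ++ [x]).toFinset.card : Nat) : Int) := by
      rw [ihf, ihd, pvCardApp]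
      by_cases hc0 : x ∈ w
      · rw [if_neg (by simpa [List.count_eq_zero] using hc0), if_pos hc0]; push_cast; ring
      · rw [if_pos (by simpa [List.count_eq_zero] using hc0), if_neg hc0]; push_cast; ring
    by_cases hcase : (k' : Int) ≤ (m : Int)
    · -- window already full: slide
      have hkm : k' ≤ m := by exact_mod_cast hcase
      have hd : m - k' < nums.length := by omega
      have hsplit : w ++ [x] = nums[m - k'] :: w1 := pvWinSucc_ge nums k' m hx hkm hk hd
      set y := nums[m - k'] with hydef
      have hyget : PySem.List.pyGetD nums ((m : Int) - (k' : Int)) 0 = y := by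
        have hcast : ((m : Int) - (k' : Int)) = ((m - k' : Nat) : Int) := by omega
        rw [hcast, PySem.List.pyGetD_natCast, List.getD_eq_getElem _ _ hd]
      rw [if_pos hcase, hyget]
      have hyc : (w ++ [x]).count y = 1 + w1.count y := by
        rw [hsplit, List.count_cons_self]; omega
      have hs : st.1 + x - y = w1.sum := by
        have h1 : (w ++ [x]).sum = y + w1.sum := by rw [hsplit]; simp
        have h2 : w.sum + x = (w ++ [x]).sum := by simp
        rw [ihs]; omega
      have hcy : (st.2.1.insert x (st.2.1.getD x 0 + 1)).getD y 0 = 1 + (w1.count y : Int) := by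
        rw [hcnt y, hyc]; push_cast; ring
      have hdist : (if (st.2.1.insert x (st.2.1.getD x 0 + 1)).getD y 0 = 1
            then (if st.2.1.getD x 0 = 0 then st.2.2.1 + 1 else st.2.2.1) - 1
            else (if st.2.1.getD x 0 = 0 then st.2.2.1 + 1 else st.2.2.1))
          = ((w1.toFinset.card : Nat) : Int) := by
        rw [hcy, hdapp, hsplit, pvCardCons]
        by_cases hy1 : y ∈ w1
        · rw [if_neg (by have := List.count_pos_iff.2 hy1; omega), if_pos hy1]; push_cast; ring
        · rw [if_pos (by simp [List.count_eq_zero.2 hy1]), if_neg hy1]; push_cast; ring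
      refine ⟨hs, ?_, hdist, ?_⟩
      · intro v
        by_cases hv : v = y
        · subst hv
          rw [PySem.Dict.getD_insert_self, hcy]
          ring
        · have h1 : ((st.2.1.insert x (st.2.1.getD x 0 + 1)).insert y
              ((st.2.1.insert x (st.2.1.getD x 0 + 1)).getD y 0 - 1)).getD v 0
              = (st.2.1.insert x (st.2.1.getD x 0 + 1)).getD v 0 := by
            exact PySem.Dict.getD_insert_of_ne _ _ _ hv
          rw [h1, hcnt v, hsplit, List.count_cons, if_neg (by simp only [beq_iff_eq]; exact fun h => hv h.symm)]
          simp
      · -- best component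
        dsimp only
        rw [hdist, hs, ihb]
        have hw1eq : (nums.drop (m+1-k')).take k' = w1 := by
          rw [hw1, pvWinEq]
          congr 1
          omega
        rw [pvSpecSucc nums k' m (by omega), hw1eq]
        by_cases hcard : w1.toFinset.card = k'
        · rw [if_pos (by exact_mod_cast hcard : w1.toFinset.card = k'),
            if_pos ⟨by omega, by exact_mod_cast hcard⟩]
        · rw [if_neg (by exact_mod_cast hcard : ¬ w1.toFinset.card = k'),
            if_neg (by
              rintro ⟨-, h2⟩
              exact hcard (by exact_mod_cast h2))]
    · -- window still growing
      have hkm : m < k' := by omega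
      have happ : w ++ [x] = w1 := (pvWinSucc_lt nums k' m hx hkm).symm
      rw [if_neg hcase]
      refine ⟨by rw [ihs, ← happ]; simp, ?_, by rw [hdapp, happ], ?_⟩
      · intro v; rw [hcnt v, happ]
      · -- best component
        dsimp only
        rw [hdapp, happ, ihs, ihb]
        by_cases hfull : k' ≤ m + 1
        · have hw1eq : (nums.drop (m+1-k')).take k' = w1 := by
            rw [hw1, pvWinEq]
            congr 1
            omega
          have hsum : w.sum + x = w1.sum := by rw [← happ]; simp
          rw [pvSpecSucc nums k' m hfull, hw1eq, hsum]
          by_cases hcard : w1.toFinset.card = k'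
          · rw [if_pos ⟨by omega, by exact_mod_cast hcard⟩,
              if_pos (by exact_mod_cast hcard : w1.toFinset.card = k')]
          · rw [if_neg (by
              rintro ⟨-, h2⟩
              exact hcard (by exact_mod_cast h2)),
              if_neg (by exact_mod_cast hcard : ¬ w1.toFinset.card = k')]
        · have hz : pvSpec nums k' m = 0 := by
            unfold pvSpec
            rw [Nat.sub_eq_zero_of_le (by omega)]
            simp
          have hz1 : pvSpec nums k' (m+1) = 0 := by
            unfold pvSpec
            rw [Nat.sub_eq_zero_of_le (by omega)]
            simp
          rw [if_neg (by rintro ⟨h1, -⟩; omega), hz, hz1]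

lemma pvWinSub (nums : List Int) (i k' : Nat) : ((nums.drop i).take k').toFinset.card ≤ nums.toFinset.card := by
  apply Finset.card_le_card
  intro x hx
  simp only [List.mem_toFinset] at *
  exact List.mem_of_mem_drop (List.mem_of_mem_take hx)

lemma pvSpec_zero (nums : List Int) (k' m : Nat) (h : nums.toFinset.card < k') :
    pvSpec nums k' m = 0 := by
  unfold pvSpec
  rw [PySem.List.foldl_congr_mem (g := fun ms _ => ms)]
  · exact List.foldl_fixed ..
  · intro acc i _
    rw [if_neg]
    have := pvWinSub nums i k'
    omega

lemma pvMaxZero (l : List Int) : l.foldl (fun (ms : Int) _ => max ms 0) (0:Int) = 0 := by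
  induction l with
  | nil => rfl
  | cons a t ih => simpa using ih

lemma pvA_nonpos (nums : List Int) (k : Int) (hk : k ≤ 0) :
    maxSumOfDistinctSubarrays nums k = 0 := by
  unfold maxSumOfDistinctSubarrays
  rw [if_neg (by omega)]
  rcases eq_or_lt_of_le hk with hk0 | hkneg
  · -- k = 0
    subst hk0
    rw [PySem.List.foldl_congr_mem (g := fun ms _ => max ms 0)]
    · exact pvMaxZero _
    · intro acc i _
      have hsl : PySem.List.slice nums (some i) (some (i + 0)) = [] := by
        apply List.eq_nil_of_length_eq_zero
        rw [add_zero, PySem.List.length_slice]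
        omega
      rw [hsl]
      simp [PySem.Set.ofList]
  · rw [PySem.List.foldl_congr_mem (g := fun ms _ => ms)]
    · exact List.foldl_fixed ..
    · intro acc i _
      rw [if_neg (by omega)]

lemma pvA_big (nums : List Int) (k : Int) (hk : (nums.length : Int) < k) :
    maxSumOfDistinctSubarrays nums k = 0 := by
  unfold maxSumOfDistinctSubarrays
  rw [if_pos]
  have h1 := pvSetLen nums
  have h2 := List.toFinset_card_le nums
  omega

lemma pvA_eq_spec (nums : List Int) (k' : Nat) (hn : k' ≤ nums.length)
    (hg : ¬ ((PySem.Set.ofList nums).length : Int) < (k' : Int)) :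
    maxSumOfDistinctSubarrays nums (k' : Int) = pvSpec nums k' nums.length := by
  unfold maxSumOfDistinctSubarrays pvSpec
  rw [if_neg hg, PySem.List.pyRange_one]
  have hb : (((nums.length : Int) - (k' : Int) + 1) - 0).toNat = nums.length + 1 - k' := by omega
  rw [hb, List.foldl_map]
  apply PySem.List.foldl_congr_mem
  intro acc j hj
  simp only [zero_add]
  rw [PySem.List.slice_natCast_add]
  rw [pvSetLen]
  by_cases hc : ((nums.drop j).take k').toFinset.card = k'
  · rw [if_pos (by exact_mod_cast hc), if_pos hc]
  · rw [if_neg (by exact_mod_cast hc), if_neg hc]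

lemma pvB_eq_spec (nums : List Int) (k' : Nat) (hk : 1 ≤ k') (hn : k' ≤ nums.length) :
    maxSumOfDistinctSubarrays_alt nums (k' : Int) = pvSpec nums k' nums.length := by
  unfold maxSumOfDistinctSubarrays_alt
  rw [if_neg (by omega)]
  have h := (pvBInv nums k' hk nums.length le_rfl).2.2.2
  rw [List.take_length] at h
  exact h

-- ===== VERDICT (by name: the statement is the Claim_ definition above) =====
theorem maxSumOfDistinctSubarrays_spec : Claim_equal_maxSumOfDistinctSubarrays := by
  intro nums k _
  unfold Spec_maxSumOfDistinctSubarrays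
  by_cases hk0 : k ≤ 0
  · rw [pvA_nonpos nums k hk0]
    unfold maxSumOfDistinctSubarrays_alt
    rw [if_pos (Or.inl hk0)]
  · by_cases hbig : (nums.length : Int) < k
    · rw [pvA_big nums k hbig]
      unfold maxSumOfDistinctSubarrays_alt
      rw [if_pos (Or.inr hbig)]
    · obtain ⟨k', rfl⟩ : ∃ k' : Nat, k = (k' : Int) := ⟨k.toNat, by omega⟩
      have hk : 1 ≤ k' := by omega
      have hn : k' ≤ nums.length := by omega
      rw [pvB_eq_spec nums k' hk hn]
      by_cases hg : ((PySem.Set.ofList nums).length : Int) < (k' : Int)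
      · rw [pvSpec_zero nums k' nums.length (by have := pvSetLen nums; omega)]
        unfold maxSumOfDistinctSubarrays
        rw [if_pos hg]
      · exact pvA_eq_spec nums k' hn hg
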